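-- pv_equiv track=rewrite | github.com/IlyaVirtyozzz/TimeForYouRestart | time_skill/time_change.py | tts_change
-- ===== SOURCE A (Python) =====
-- def time_word(t, id):
--     times = {"0": ["час", "часа", "часов"], "1": ["минута", "минуты", "минут"], '2': ["секунда", "секунды", "секунд"]}
--     s = str(t)
--     s = s.lstrip("0")
--     if len(s) == 0:
--         return times[str(id)][2]
--     elif len(s) >= 2:
--         if int(s[-2]) == 1 or int(s[-1]) == 0:
--             return times[str(id)][2]
--         else:
--             if int(s) == 0 or (5 <= int(s[-1]) <= 9):
--                 return times[str(id)][2]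
--             elif 2 <= int(s[-1]) <= 4:
--                 return times[str(id)][1]
--             else:
--                 return times[str(id)][0]
--     else:
--         if int(s) == 0 or 5 <= int(s[-1]) <= 9:
--             return times[str(id)][2]
--         elif 2 <= int(s[-1]) <= 4:
--             return times[str(id)][1]
--         else:
--             return times[str(id)][0]
--
-- def tts_change(h, m, s):
--     hour = time_word(int(h), 0)
--     minute = time_word(int(m), 1)
--     second = time_word(int(s), 2)
--     text = ""
--     for i in [[h, hour], [m, minute], [s, second]]:
--         if str(i[0]).lstrip("0") != "":
--             text += str(int(str(i[0]).lstrip("0"))) + " " + str(i[1]) + " "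
--     return text
-- ===== SOURCE B (Python) =====
-- FORMS = [["час", "часа", "часов"], ["минута", "минуты", "минут"], ["секунда", "секунды", "секунд"]]
--
--
-- def _plural(n, forms):
--     a = abs(n)
--     last_two = a % 100
--     last = a % 10
--     if a == 0 or 11 <= last_two <= 14 or last == 0 or last >= 5:
--         return forms[2]
--     if 2 <= last <= 4:
--         return forms[1]
--     return forms[0]
--
--
-- def tts_change(h, m, s):
--     parts = []
--     for value, forms in zip((int(h), int(m), int(s)), FORMS):
--         if value != 0:
--             parts.append("%d %s " % (value, _plural(value, forms)))
--     return "".join(parts)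
-- ===== Notes on version B (the rewrite author's own statement) =====
-- stated objective: simpler
-- what changed: B replaces A's string surgery (str(t), lstrip('0'), indexing the last two characters and re-parsing them with int) by the arithmetic Russian-plural rule on abs(n) (n%10 / n%100 with the 11-14 window) and builds the output by joining the nonzero parts.
-- crash fix: A raises ValueError (int('-')) whenever some argument lies in -9..-1 (a single-digit negative); B returns the formatted text there, e.g. '-5 часов ' for (-5, 0, 0). — e.g. on tts_change(-5, 0, 0): A raises ValueError, B returns "-5 часов "
import Mathlib
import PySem

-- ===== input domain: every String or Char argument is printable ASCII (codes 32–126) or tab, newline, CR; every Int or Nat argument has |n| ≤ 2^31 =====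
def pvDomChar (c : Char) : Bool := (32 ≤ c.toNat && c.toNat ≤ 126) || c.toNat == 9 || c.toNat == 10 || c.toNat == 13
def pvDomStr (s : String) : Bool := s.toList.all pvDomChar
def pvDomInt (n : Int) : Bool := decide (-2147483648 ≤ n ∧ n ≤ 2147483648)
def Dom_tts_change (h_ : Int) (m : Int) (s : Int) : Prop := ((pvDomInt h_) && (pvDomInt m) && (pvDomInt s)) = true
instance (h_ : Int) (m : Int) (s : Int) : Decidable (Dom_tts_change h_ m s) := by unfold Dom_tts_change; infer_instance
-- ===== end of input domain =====

-- B replaces A's digit-string surgery by the arithmetic Russian-plural rule on |n| (simpler); return values only.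

-- ===== PORT A =====
-- Python `int(cs)` exactly on non-empty ASCII-digit strings (the only unsigned shapes A feeds to `int` under Pre_)
def pvDigitsVal (cs : List Char) : Int := cs.foldl (fun a c => 10 * a + ((c.toNat : Int) - 48)) 0
-- Python `int(cs)` exactly on optional-'-' ASCII-digit strings — every string A's `int` receives under Pre_
def pvIntStr (cs : List Char) : Int :=
  match cs with
  | '-' :: ds => -(pvDigitsVal ds)
  | ds => pvDigitsVal ds

-- the dict literal `times`
def pvTimes : PySem.Dict String (List String) :=
  ((PySem.Dict.empty.insert "0" ["час", "часа", "часов"]).insert "1"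
      ["минута", "минуты", "минут"]).insert "2" ["секунда", "секунды", "секунд"]

-- `s.lstrip("0")` is ported as dropping the leading '0' characters (exact)
def time_word (t : Int) (id : Int) : String :=
  let times := pvTimes
  let s := (PySem.Int.toStr t).toList.dropWhile (fun c => c == '0')
  let forms := times.getD (PySem.Int.toStr id) []
  if s.length = 0 then
    PySem.List.pyGetD forms 2 ""
  else if 2 ≤ s.length then
    if pvIntStr [PySem.List.pyGetD s (-2) ' '] = 1 ∨ pvIntStr [PySem.List.pyGetD s (-1) ' '] = 0 then
      PySem.List.pyGetD forms 2 ""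
    else if pvIntStr s = 0 ∨ (5 ≤ pvIntStr [PySem.List.pyGetD s (-1) ' '] ∧ pvIntStr [PySem.List.pyGetD s (-1) ' '] ≤ 9) then
      PySem.List.pyGetD forms 2 ""
    else if 2 ≤ pvIntStr [PySem.List.pyGetD s (-1) ' '] ∧ pvIntStr [PySem.List.pyGetD s (-1) ' '] ≤ 4 then
      PySem.List.pyGetD forms 1 ""
    else
      PySem.List.pyGetD forms 0 ""
  else
    if pvIntStr s = 0 ∨ (5 ≤ pvIntStr [PySem.List.pyGetD s (-1) ' '] ∧ pvIntStr [PySem.List.pyGetD s (-1) ' '] ≤ 9) then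
      PySem.List.pyGetD forms 2 ""
    else if 2 ≤ pvIntStr [PySem.List.pyGetD s (-1) ' '] ∧ pvIntStr [PySem.List.pyGetD s (-1) ' '] ≤ 4 then
      PySem.List.pyGetD forms 1 ""
    else
      PySem.List.pyGetD forms 0 ""

def tts_change (h_ : Int) (m : Int) (s : Int) : String :=
  let hour := time_word h_ 0      -- int(h) = h on ints
  let minute := time_word m 1
  let second := time_word s 2
  [(h_, hour), (m, minute), (s, second)].foldl
    (fun text i =>
      if (PySem.Int.toStr i.1).toList.dropWhile (fun c => c == '0') ≠ [] then
        text ++ PySem.Int.toStr (pvIntStr ((PySem.Int.toStr i.1).toList.dropWhile (fun c => c == '0')))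
          ++ " " ++ i.2 ++ " "
      else text) ""

-- ===== PORT B =====
def pvForms : List (List String) :=
  [["час", "часа", "часов"], ["минута", "минуты", "минут"], ["секунда", "секунды", "секунд"]]

def pvPlural (n : Int) (forms : List String) : String :=
  let a := |n|
  let lastTwo := PySem.Int.mod a 100
  let last := PySem.Int.mod a 10
  if a = 0 ∨ (11 ≤ lastTwo ∧ lastTwo ≤ 14) ∨ last = 0 ∨ 5 ≤ last then
    PySem.List.pyGetD forms 2 ""
  else if 2 ≤ last ∧ last ≤ 4 then
    PySem.List.pyGetD forms 1 ""
  else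
    PySem.List.pyGetD forms 0 ""

def tts_change_alt (h_ : Int) (m : Int) (s : Int) : String :=
  let pairs := List.zip [h_, m, s] pvForms
  let parts := pairs.foldl
    (fun acc p =>
      if p.1 ≠ 0 then acc ++ [PySem.Int.toStr p.1 ++ " " ++ pvPlural p.1 p.2 ++ " "] else acc) []
  PySem.Str.join "" parts

-- ===== PRECONDITION & SPEC =====
-- Pre_ excludes exactly the inputs on which A raises: any argument in -9..-1 reaches int('-') (ValueError).
def Pre_tts_change (h_ : Int) (m : Int) (s : Int) : Prop :=
  (0 ≤ h_ ∨ h_ ≤ -10) ∧ (0 ≤ m ∨ m ≤ -10) ∧ (0 ≤ s ∨ s ≤ -10)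
instance (h_ : Int) (m : Int) (s : Int) : Decidable (Pre_tts_change h_ m s) := by
  unfold Pre_tts_change; infer_instance

def pvWitness_tts_change : Int × Int × Int := (1, 21, 0)

-- A raises ValueError (int('-')) when some argument lies in -9..-1; B returns the formatted text there.
def Raises_tts_change (h_ : Int) (m : Int) (s : Int) : Prop :=
  (-9 ≤ h_ ∧ h_ ≤ -1) ∨ (-9 ≤ m ∧ m ≤ -1) ∨ (-9 ≤ s ∧ s ≤ -1)
instance (h_ : Int) (m : Int) (s : Int) : Decidable (Raises_tts_change h_ m s) := by
  unfold Raises_tts_change; infer_instance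
def pvRaiseWitness_tts_change : Int × Int × Int := (-5, 0, 0)
def pvRaiseWitnessOut_tts_change : String := "-5 часов "

def Spec_tts_change (h_ : Int) (m : Int) (s : Int) (out : String) : Prop := out = tts_change_alt h_ m s
instance (h_ : Int) (m : Int) (s : Int) (out : String) : Decidable (Spec_tts_change h_ m s out) := by
  unfold Spec_tts_change; infer_instance

-- ===== CLAIM (what is proved, stated in full; the proofs are below) =====
def Claim_equal_tts_change : Prop := ∀ (h_ : Int) (m : Int) (s : Int), Dom_tts_change h_ m s → Pre_tts_change h_ m s → Spec_tts_change h_ m s (tts_change h_ m s)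

def Claim_raises_tts_change : Prop := (∀ (h_ : Int) (m : Int) (s : Int), Dom_tts_change h_ m s → Raises_tts_change h_ m s → ¬ Pre_tts_change h_ m s) ∧ (Dom_tts_change (pvRaiseWitness_tts_change.1) (pvRaiseWitness_tts_change.2.1) (pvRaiseWitness_tts_change.2.2) ∧ Raises_tts_change (pvRaiseWitness_tts_change.1) (pvRaiseWitness_tts_change.2.1) (pvRaiseWitness_tts_change.2.2) ∧ tts_change_alt (pvRaiseWitness_tts_change.1) (pvRaiseWitness_tts_change.2.1) (pvRaiseWitness_tts_change.2.2) = pvRaiseWitnessOut_tts_change)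

-- ===== LEMMAS AND PROOFS =====

-- decimal digit characters of n (A's `str(n)` without sign), in order
def pvD (n : Nat) : List Char :=
  if h : n < 10 then [Nat.digitChar n] else pvD (n / 10) ++ [Nat.digitChar (n % 10)]
  termination_by n
  decreasing_by exact Nat.div_lt_self (by omega) (by omega)

lemma toDigitsCore_eq_pvD (n : Nat) : ∀ (fuel : Nat) (ds : List Char), n < fuel →
    Nat.toDigitsCore 10 fuel n ds = pvD n ++ ds := by
  induction n using Nat.strong_induction_on with
  | _ n ih =>
    intro fuel ds h
    match fuel with
    | f + 1 =>
      rw [show Nat.toDigitsCore 10 (f+1) n ds =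
        (if n / 10 = 0 then (n % 10).digitChar :: ds
         else Nat.toDigitsCore 10 f (n / 10) ((n % 10).digitChar :: ds)) from rfl]
      by_cases h10 : n / 10 = 0
      · rw [if_pos h10, pvD]
        have hn : n < 10 := by omega
        rw [dif_pos hn, Nat.mod_eq_of_lt hn]
        rfl
      · rw [if_neg h10, ih (n / 10) (Nat.div_lt_self (by omega) (by omega)) f ((n % 10).digitChar :: ds) (by omega)]
        conv_rhs => rw [pvD, dif_neg (by omega)]
        simp


lemma toDigits_eq_pvD (n : Nat) : Nat.toDigits 10 n = pvD n := by
  have := toDigitsCore_eq_pvD n (n + 1) [] (by omega)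
  simpa [Nat.toDigits] using this


lemma toChars_of_nonneg (t : Int) (h : 0 ≤ t) : PySem.Int.toChars t = pvD t.toNat := by
  unfold PySem.Int.toChars
  rw [if_neg (by omega), toDigits_eq_pvD]


lemma toChars_of_neg (t : Int) (h : t < 0) : PySem.Int.toChars t = '-' :: pvD t.natAbs := by
  unfold PySem.Int.toChars
  rw [if_pos h, toDigits_eq_pvD]


lemma pvD_ne_nil (n : Nat) : pvD n ≠ [] := by
  rw [pvD]; split <;> simp


lemma pvD_head (n : Nat) (h : n ≠ 0) :
    ∃ d cs, pvD n = Nat.digitChar d :: cs ∧ 1 ≤ d ∧ d ≤ 9 := by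
  induction n using Nat.strong_induction_on with
  | _ n ih =>
    rw [pvD]
    by_cases hn : n < 10
    · exact ⟨n, [], by rw [dif_pos hn], by omega, by omega⟩
    · obtain ⟨d, cs, hdc, h1, h9⟩ := ih (n / 10) (Nat.div_lt_self (by omega) (by omega)) (by omega)
      exact ⟨d, cs ++ [Nat.digitChar (n % 10)], by rw [dif_neg hn, hdc]; rfl, h1, h9⟩


lemma pvD_dropWhile (n : Nat) (h : n ≠ 0) : (pvD n).dropWhile (fun c => c == '0') = pvD n := by
  obtain ⟨d, cs, hdc, h1, h9⟩ := pvD_head n h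
  rw [hdc, List.dropWhile_cons]
  have : (Nat.digitChar d == '0') = false := by interval_cases d <;> decide
  simp [this]


lemma digitChar_val (d : Nat) (h : d < 10) : ((Nat.digitChar d).toNat : Int) - 48 = d := by
  interval_cases d <;> decide


lemma pvDigitsVal_concat (cs : List Char) (c : Char) :
    pvDigitsVal (cs ++ [c]) = 10 * pvDigitsVal cs + ((c.toNat : Int) - 48) := by
  simp [pvDigitsVal, List.foldl_append]


lemma pvDigitsVal_pvD (n : Nat) : pvDigitsVal (pvD n) = n := by
  induction n using Nat.strong_induction_on with
  | _ n ih =>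
    rw [pvD]
    by_cases hn : n < 10
    · rw [dif_pos hn]
      have := digitChar_val n hn
      simp [pvDigitsVal] at this ⊢
      omega
    · rw [dif_neg hn, pvDigitsVal_concat, ih (n / 10) (Nat.div_lt_self (by omega) (by omega)),
        digitChar_val (n % 10) (by omega)]
      push_cast
      omega


lemma pvIntStr_cons (c : Char) (h : c ≠ '-') (cs : List Char) :
    pvIntStr (c :: cs) = pvDigitsVal (c :: cs) := by
  unfold pvIntStr
  split
  · rename_i heq; cases heq; exact absurd rfl h
  · rfl


lemma pvIntStr_digit (d : Nat) (h : d < 10) : pvIntStr [Nat.digitChar d] = d := by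
  interval_cases d <;> decide


lemma pvIntStr_pvD (n : Nat) : pvIntStr (pvD n) = n := by
  by_cases h0 : n = 0
  · subst h0; rw [pvD]; decide
  · obtain ⟨d, cs, hdc, h1, h9⟩ := pvD_head n h0
    have hne : Nat.digitChar d ≠ '-' := by interval_cases d <;> decide
    rw [hdc, pvIntStr_cons _ hne, ← hdc, pvDigitsVal_pvD]


lemma pvD_getLast? (n : Nat) : (pvD n).getLast? = some (Nat.digitChar (n % 10)) := by
  rw [pvD]
  by_cases hn : n < 10
  · rw [dif_pos hn, Nat.mod_eq_of_lt hn]; rfl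
  · rw [dif_neg hn]; simp



lemma pvD_length_ge (n : Nat) (h : 10 ≤ n) : 2 ≤ (pvD n).length := by
  rw [pvD, dif_neg (by omega)]
  cases hD : pvD (n / 10) with
  | nil => exact absurd hD (pvD_ne_nil _)
  | cons c cs => simp



lemma pvIntStr_neg (ds : List Char) : pvIntStr ('-' :: ds) = -(pvDigitsVal ds) := rfl

lemma pyGetD_neg_two (ys : List Char) (c : Char) (hy : ys.getLast? = some c) (x d : Char) :
    PySem.List.pyGetD (ys ++ [x]) (-2) d = c := by
  have hne : ys ≠ [] := by intro h; rw [h] at hy; simp at hy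
  have hlen : 1 ≤ ys.length := List.length_pos_of_ne_nil hne
  rw [PySem.List.pyGetD_neg_ofNat (ys ++ [x]) 2 d (by omega) (by simp; omega)]
  have h2 : (ys ++ [x])[(ys ++ [x]).length - 2]? = some c := by
    rw [show (ys ++ [x]).length - 2 = ys.length - 1 by simp, List.getElem?_append_left (by omega),
      ← List.getLast?_eq_getElem?]
    exact hy
  rw [List.getElem?_eq_getElem (by simp)] at h2
  exact Option.some.inj h2

lemma word_eq (t : Int) (ht : 0 ≤ t ∨ t ≤ -10) (id : Int) :
    time_word t id = pvPlural t (pvTimes.getD (PySem.Int.toStr id) []) := by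
  have habs : |t| = ((t.natAbs : Nat) : Int) := Int.abs_eq_natAbs t
  rcases ht with hpos | hneg
  · by_cases h0 : t = 0
    · subst h0
      have hc : PySem.Int.toChars 0 = ['0'] := by
        rw [toChars_of_nonneg 0 le_rfl, pvD]; rfl
      simp [time_word, pvPlural, PySem.Int.toList_toStr, hc, List.dropWhile]
    · have hta : t = (t.toNat : Int) := by omega
      have ha0 : t.toNat ≠ 0 := by omega
      have hchars : (PySem.Int.toStr t).toList.dropWhile (fun c => c == '0') = pvD t.toNat := by
        rw [PySem.Int.toList_toStr, toChars_of_nonneg t hpos, pvD_dropWhile _ ha0]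
      have hmod : t.natAbs = t.toNat := by omega
      by_cases h10 : t.toNat < 10
      · have hD : pvD t.toNat = [] ++ [Nat.digitChar t.toNat] := by
          rw [pvD, dif_pos h10]; rfl
        simp only [time_word, pvPlural, hchars, hD, PySem.List.pyGetD_neg_one_append_singleton,
          pvIntStr_digit _ h10, habs, hmod, PySem.Int.mod]
        rw [show pvIntStr ([] ++ [Nat.digitChar t.toNat]) = (t.toNat : Int) by
          simpa using pvIntStr_digit _ h10]
        simp only [Int.fmod_eq_emod, List.length_append, List.length_nil, List.length_cons,
          List.length_nil]
        norm_num
        split_ifs <;> first | rfl | omega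
      · have hD : pvD t.toNat = pvD (t.toNat / 10) ++ [Nat.digitChar (t.toNat % 10)] := by
          rw [pvD, dif_neg (by omega)]
        have hlast := pvD_getLast? (t.toNat / 10)
        have hlen2 := pvD_length_ge t.toNat (by omega)
        have hpen : PySem.List.pyGetD (pvD t.toNat) (-2) ' ' = Nat.digitChar (t.toNat / 10 % 10) := by
          rw [hD]; exact pyGetD_neg_two _ _ hlast _ _
        have hval : pvIntStr (pvD t.toNat) = (t.toNat : Int) := pvIntStr_pvD _
        simp only [time_word, pvPlural, hchars, hpen, hval, habs, hmod, PySem.Int.mod]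
        rw [hD, PySem.List.pyGetD_neg_one_append_singleton, ← hD]
        simp only [pvIntStr_digit _ (Nat.mod_lt _ (by omega)), Int.fmod_eq_emod]
        have hl : ¬ (pvD t.toNat).length = 0 := by omega
        norm_num [hl]
        rw [if_pos (by omega)]
        split_ifs <;> first | rfl | omega
  · have ha10 : 10 ≤ t.natAbs := by omega
    have hD : pvD t.natAbs = pvD (t.natAbs / 10) ++ [Nat.digitChar (t.natAbs % 10)] := by
      rw [pvD, dif_neg (by omega)]
    obtain ⟨c0, cs0, hcc⟩ : ∃ c0 cs0, pvD (t.natAbs / 10) = c0 :: cs0 := by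
      cases hE : pvD (t.natAbs / 10) with
      | nil => exact absurd hE (pvD_ne_nil _)
      | cons c cs => exact ⟨c, cs, rfl⟩
    have hchars : (PySem.Int.toStr t).toList.dropWhile (fun c => c == '0') =
        ('-' :: pvD (t.natAbs / 10)) ++ [Nat.digitChar (t.natAbs % 10)] := by
      rw [PySem.Int.toList_toStr, toChars_of_neg t (by omega), List.dropWhile_cons]
      norm_num
      rw [hD]; rfl
    have hlast : ('-' :: pvD (t.natAbs / 10)).getLast? = some (Nat.digitChar (t.natAbs / 10 % 10)) := by
      rw [hcc, List.getLast?_cons_cons, ← hcc]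
      exact pvD_getLast? _
    have hpen : PySem.List.pyGetD (('-' :: pvD (t.natAbs / 10)) ++ [Nat.digitChar (t.natAbs % 10)]) (-2) ' ' =
        Nat.digitChar (t.natAbs / 10 % 10) := pyGetD_neg_two _ _ hlast _ _
    have hval : pvIntStr (('-' :: pvD (t.natAbs / 10)) ++ [Nat.digitChar (t.natAbs % 10)]) =
        -(t.natAbs : Int) := by
      rw [show ('-' :: pvD (t.natAbs / 10)) ++ [Nat.digitChar (t.natAbs % 10)] =
          '-' :: pvD t.natAbs by rw [hD]; rfl, pvIntStr_neg, pvDigitsVal_pvD]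
    have hlen2 := pvD_length_ge t.natAbs ha10
    have hlenD : (('-' :: pvD (t.natAbs / 10)) ++ [Nat.digitChar (t.natAbs % 10)]).length =
        (pvD t.natAbs).length + 1 := by rw [hD]; simp
    simp only [time_word, pvPlural, hchars, hpen, hval, habs, PySem.Int.mod,
      PySem.List.pyGetD_neg_one_append_singleton, pvIntStr_digit _ (Nat.mod_lt _ (by omega)),
      Int.fmod_eq_emod, hlenD]
    have hl : ¬ ((pvD t.natAbs).length + 1 = 0) := by omega
    norm_num [hl]
    rw [if_pos (by omega)]
    split_ifs <;> first | rfl | omega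

lemma stripped_eq_nil (t : Int) (ht : 0 ≤ t ∨ t ≤ -10) :
    ((PySem.Int.toStr t).toList.dropWhile (fun c => c == '0') = []) ↔ t = 0 := by
  by_cases h0 : t = 0
  · subst h0
    have hc : PySem.Int.toChars 0 = ['0'] := by
      rw [toChars_of_nonneg 0 le_rfl, pvD]; rfl
    simp [PySem.Int.toList_toStr, hc, List.dropWhile]
  · apply iff_of_false _ h0
    rcases ht with hpos | hneg
    · rw [PySem.Int.toList_toStr, toChars_of_nonneg t hpos, pvD_dropWhile _ (by omega)]
      exact pvD_ne_nil _
    · rw [PySem.Int.toList_toStr, toChars_of_neg t (by omega), List.dropWhile_cons,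
        if_neg (by decide)]
      simp

lemma stripped_roundtrip (t : Int) (ht : 0 ≤ t ∨ t ≤ -10) (h0 : t ≠ 0) :
    pvIntStr ((PySem.Int.toStr t).toList.dropWhile (fun c => c == '0')) = t := by
  rcases ht with hpos | hneg
  · rw [PySem.Int.toList_toStr, toChars_of_nonneg t hpos, pvD_dropWhile _ (by omega),
      pvIntStr_pvD]
    omega
  · rw [PySem.Int.toList_toStr, toChars_of_neg t (by omega), List.dropWhile_cons,
      if_neg (by decide), pvIntStr_neg, pvDigitsVal_pvD]
    omega

-- ===== VERDICT (by name: the statement is the Claim_ definition above) =====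
theorem tts_change_spec : Claim_equal_tts_change := by
  intro h_ m s _ hpre
  obtain ⟨hh, hm, hs⟩ := hpre
  unfold Spec_tts_change
  have e0 : pvTimes.getD (PySem.Int.toStr 0) [] = ["час", "часа", "часов"] := by decide
  have e1 : pvTimes.getD (PySem.Int.toStr 1) [] = ["минута", "минуты", "минут"] := by decide
  have e2 : pvTimes.getD (PySem.Int.toStr 2) [] = ["секунда", "секунды", "секунд"] := by decide
  have w0 := word_eq h_ hh 0; rw [e0] at w0
  have w1 := word_eq m hm 1; rw [e1] at w1
  have w2 := word_eq s hs 2; rw [e2] at w2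
  have r1 : h_ ≠ 0 → pvIntStr (List.dropWhile (fun c => c == '0') (PySem.Int.toChars h_)) = h_ :=
    fun hz => by have := stripped_roundtrip h_ hh hz; rwa [PySem.Int.toList_toStr] at this
  have r2 : m ≠ 0 → pvIntStr (List.dropWhile (fun c => c == '0') (PySem.Int.toChars m)) = m :=
    fun hz => by have := stripped_roundtrip m hm hz; rwa [PySem.Int.toList_toStr] at this
  have r3 : s ≠ 0 → pvIntStr (List.dropWhile (fun c => c == '0') (PySem.Int.toChars s)) = s :=
    fun hz => by have := stripped_roundtrip s hs hz; rwa [PySem.Int.toList_toStr] at this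
  have hA1 := not_congr (stripped_eq_nil h_ hh)
  have hA2 := not_congr (stripped_eq_nil m hm)
  have hA3 := not_congr (stripped_eq_nil s hs)
  simp only [tts_change, tts_change_alt, pvForms, List.zip_cons_cons, List.zip_nil_right,
    List.foldl_cons, List.foldl_nil, w0, w1, w2, ne_eq, hA1, hA2, hA3]
  split_ifs
  all_goals apply String.toList_inj.mp
  all_goals simp [PySem.Str.join, PySem.Chars.join_cons_cons, PySem.Chars.join_singleton,
    PySem.Chars.join_nil, *]

@[simp] theorem tts_change_raises : Claim_raises_tts_change := by
  unfold Claim_raises_tts_change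
  exact ⟨by intro h_ m s _ hr hp; unfold Raises_tts_change at hr; unfold Pre_tts_change at hp; omega,
    by decide⟩
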